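-- pv_equiv track=rewrite | github.com/fangearhq-boop/content-pipeline | _engine/scripts/generate-postplanner-export.py | _fit_hashtags_within_limit
-- ===== SOURCE A (Python) =====
-- def _fit_hashtags_within_limit(text, hashtags, limit):
--     """Add back as many hashtags as will fit within the character limit.
--
--     Tries all hashtags first, then progressively fewer until some fit.
--     Hashtags are placed on their own line (\\n\\n separator).
--     """
--     if not hashtags:
--         return text
--
--     # Try adding from all hashtags down to 1
--     for num_tags in range(len(hashtags), 0, -1):
--         tag_block = "\n\n" + " ".join(hashtags[:num_tags])
--         if len(text + tag_block) <= limit: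
--             return text + tag_block
--
--     # No hashtags fit — return text as-is
--     return text
-- ===== SOURCE B (Python) =====
-- def _fit_hashtags_within_limit(text, hashtags, limit):
--     """Single pass: running prefix length of the joined tag block picks the
--     largest count of leading hashtags that fits; the string is built once."""
--     if not hashtags:
--         return text
--     budget = limit - len(text) - 2  # room left after text and the "\n\n" separator
--     total = 0
--     best = 0
--     for i, tag in enumerate(hashtags):
--         total += len(tag) + (1 if i > 0 else 0)
--         if total <= budget:
--             best = i + 1
--     if best == 0:
--         return text
--     return text + "\n\n" + " ".join(hashtags[:best])
-- ===== Notes on version B (the rewrite author's own statement) =====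
-- stated objective: faster
-- what changed: Replaces the top-down loop that rebuilds and re-joins the full hashtag block for every candidate count with a single forward pass that maintains a running prefix length of the joined block, then builds the output string once.
import Mathlib
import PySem

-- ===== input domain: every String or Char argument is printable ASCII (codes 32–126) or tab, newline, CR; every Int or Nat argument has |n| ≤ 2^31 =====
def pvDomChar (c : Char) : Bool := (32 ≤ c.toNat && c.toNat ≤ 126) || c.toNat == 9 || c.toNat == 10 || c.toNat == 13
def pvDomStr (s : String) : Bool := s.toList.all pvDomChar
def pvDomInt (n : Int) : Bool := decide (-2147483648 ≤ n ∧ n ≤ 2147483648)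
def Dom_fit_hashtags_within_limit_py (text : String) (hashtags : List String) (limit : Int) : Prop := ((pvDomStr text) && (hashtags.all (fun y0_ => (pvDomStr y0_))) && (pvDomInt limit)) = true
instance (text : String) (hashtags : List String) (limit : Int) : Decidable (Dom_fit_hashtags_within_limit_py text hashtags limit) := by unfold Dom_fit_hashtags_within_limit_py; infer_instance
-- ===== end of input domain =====

-- B replaces A's top-down rebuild-and-rejoin scan by one forward pass over a running
-- prefix length, building the output once (measured faster; see claim).

-- ===== PORT A =====
-- the 'for num_tags in range(len(hashtags), 0, -1)' loop: return at the first fit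
def pvFitLoopA (text : String) (hashtags : List String) (limit : Int) : List Int → String
  | [] => text
  | num_tags :: rest =>
    let tag_block := "\n\n" ++ PySem.Str.join " " (PySem.List.slice hashtags none (some num_tags))
    if PySem.Str.len (text ++ tag_block) ≤ limit then text ++ tag_block
    else pvFitLoopA text hashtags limit rest

def fit_hashtags_within_limit_py (text : String) (hashtags : List String) (limit : Int) : String :=
  if hashtags = [] then text
  else pvFitLoopA text hashtags limit (PySem.List.pyRange (hashtags.length : Int) 0 (-1))

-- ===== PORT B =====
def fit_hashtags_within_limit_py_alt (text : String) (hashtags : List String) (limit : Int) : String :=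
  if hashtags = [] then text
  else
    let budget : Int := limit - PySem.Str.len text - 2
    let st := (PySem.List.enumerate hashtags 0).foldl
      (fun (st : Int × Int) p =>
        let total := st.1 + PySem.Str.len p.2 + (if 0 < p.1 then 1 else 0)
        (total, if total ≤ budget then p.1 + 1 else st.2))
      (0, 0)
    if st.2 = 0 then text
    else text ++ "\n\n" ++ PySem.Str.join " " (PySem.List.slice hashtags none (some st.2))

-- ===== PRECONDITION & SPEC =====
def Spec_fit_hashtags_within_limit_py (text : String) (hashtags : List String) (limit : Int) (out : String) : Prop := out = fit_hashtags_within_limit_py_alt text hashtags limit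
instance (text : String) (hashtags : List String) (limit : Int) (out : String) : Decidable (Spec_fit_hashtags_within_limit_py text hashtags limit out) := by unfold Spec_fit_hashtags_within_limit_py; infer_instance

-- ===== CLAIM (what is proved, stated in full; the proofs are below) =====
def Claim_equal_fit_hashtags_within_limit_py : Prop := ∀ (text : String) (hashtags : List String) (limit : Int), Dom_fit_hashtags_within_limit_py text hashtags limit → Spec_fit_hashtags_within_limit_py text hashtags limit (fit_hashtags_within_limit_py text hashtags limit)

-- ===== LEMMAS AND PROOFS =====

-- total length (as Int) of the strings in l
def pvSumLen (l : List String) : Int := (l.map (fun s => (s.toList.length : Int))).sum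

-- length of ' '.join(l) plus the count of separators, for nonempty l
def pvTot (l : List String) : Int := pvSumLen l + l.length - 1

-- the largest k in 1..m whose prefix block fits the budget (0 if none): A's top-down scan
def pvBestAux (hs : List String) (budget : Int) : Nat → Nat
  | 0 => 0
  | m + 1 => if pvTot (hs.take (m + 1)) ≤ budget then m + 1 else pvBestAux hs budget m

lemma pvJoinLen (l : List String) (h : l ≠ []) :
    ((PySem.Chars.join [' '] (l.map String.toList)).length : Int) = pvTot l := by
  induction l with
  | nil => simp at h
  | cons a t ih =>
    cases t with
    | nil => simp [PySem.Chars.join_singleton, pvTot, pvSumLen]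
    | cons b r =>
      rw [List.map_cons, List.map_cons, PySem.Chars.join_cons_cons]
      have hih := ih (by simp)
      rw [List.map_cons] at hih
      rw [List.length_append, List.length_append, List.length_singleton]
      simp only [pvTot, pvSumLen, List.map_cons, List.sum_cons, List.length_cons] at hih ⊢
      push_cast at hih ⊢
      omega

lemma pvBlockLen (text : String) (hs : List String) (k : Nat) (hk : 0 < k)
    (hle : k ≤ hs.length) :
    PySem.Str.len (text ++ ("\n\n" ++ PySem.Str.join " " (PySem.List.slice hs none (some (k : Int))))) =
      PySem.Str.len text + 2 + pvTot (hs.take k) := by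
  rw [PySem.List.slice_to_natCast]
  rw [PySem.Str.len_append, PySem.Str.len_append]
  have hne : hs.take k ≠ [] := by
    intro hcon
    have h := congrArg List.length hcon
    rw [List.length_take] at h
    simp only [List.length_nil] at h
    omega
  have hj : PySem.Str.len (PySem.Str.join " " (hs.take k)) = pvTot (hs.take k) := by
    rw [PySem.Str.len_eq, PySem.Str.toList_join]
    have hsep : (" ".toList : List Char) = [' '] := rfl
    rw [hsep, pvJoinLen _ hne]
  rw [hj]
  have h2 : PySem.Str.len "\n\n" = 2 := rfl
  rw [h2]
  ring

-- A's loop on the descending range computes the top-down best fit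
lemma pvLoopA_eq (text : String) (hs : List String) (limit : Int) (m : Nat)
    (hm : m ≤ hs.length) :
    pvFitLoopA text hs limit (PySem.List.pyRange (m : Nat) 0 (-1)) =
      (if pvBestAux hs (limit - PySem.Str.len text - 2) m = 0 then text
       else text ++ ("\n\n" ++ PySem.Str.join " "
         (PySem.List.slice hs none (some ((pvBestAux hs (limit - PySem.Str.len text - 2) m : Nat) : Int))))) := by
  induction m with
  | zero =>
    rw [PySem.List.pyRange_neg_one_eq_nil (by norm_num)]
    simp [pvFitLoopA, pvBestAux]
  | succ m ih =>
    rw [PySem.List.pyRange_neg_one_cons (by push_cast; omega)]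
    have hcast : ((m + 1 : Nat) : Int) - 1 = ((m : Nat) : Int) := by push_cast; ring
    rw [hcast]
    simp only [pvFitLoopA]
    have hlen := pvBlockLen text hs (m + 1) (by omega) hm
    by_cases hfit : pvTot (hs.take (m + 1)) ≤ limit - PySem.Str.len text - 2
    · rw [if_pos (by rw [hlen]; omega)]
      simp only [pvBestAux, if_pos hfit]
      rw [if_neg (by omega)]
    · rw [if_neg (by rw [hlen]; omega)]
      rw [ih (by omega)]
      simp only [pvBestAux, if_neg hfit]

-- B's forward fold computes the running total and the same best fit
lemma pvFoldB_eq (budget : Int) (l : List String) (h : l ≠ []) :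
    (PySem.List.enumerate l 0).foldl
      (fun (st : Int × Int) p =>
        let total := st.1 + PySem.Str.len p.2 + (if 0 < p.1 then 1 else 0)
        (total, if total ≤ budget then p.1 + 1 else st.2))
      (0, 0) =
      (pvTot l, ((pvBestAux l budget l.length : Nat) : Int)) := by
  induction l using List.reverseRecOn with
  | nil => simp at h
  | append_singleton ys x ih =>
    cases ys with
    | nil =>
      simp only [List.nil_append, PySem.List.enumerate_cons, PySem.List.enumerate_nil,
        List.foldl_cons, List.foldl_nil, pvTot, pvSumLen, pvBestAux,
        List.map_cons, List.map_nil, List.sum_cons, List.sum_nil,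
        List.length_cons, List.length_nil, List.take_succ_cons, List.take_nil]
      rw [PySem.Str.len_eq]
      push_cast
      norm_num
    | cons y t =>
      have hne : y :: t ≠ [] := by simp
      rw [PySem.List.enumerate_append, List.foldl_append, ih hne]
      simp only [PySem.List.enumerate_cons, PySem.List.enumerate_nil, List.foldl_cons,
        List.foldl_nil, zero_add]
      have hpos : (0 : Int) < ((y :: t).length : Int) := by exact_mod_cast Nat.succ_pos t.length
      rw [if_pos hpos]
      have hx : PySem.Str.len x = (x.toList.length : Int) := PySem.Str.len_eq x
      have htot : pvTot (y :: t) + PySem.Str.len x + 1 = pvTot ((y :: t) ++ [x]) := by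
        simp only [pvTot, pvSumLen, List.map_append, List.sum_append, List.length_append,
          List.map_cons, List.map_nil, List.sum_cons, List.sum_nil, List.length_cons,
          List.length_nil, hx]
        push_cast
        ring
      rw [htot]
      have hpre : ∀ m : Nat, m ≤ (y :: t).length →
          pvBestAux ((y :: t) ++ [x]) budget m = pvBestAux (y :: t) budget m := by
        intro m
        induction m with
        | zero => intro _; rfl
        | succ k ihk =>
          intro hk
          simp only [pvBestAux]
          rw [List.take_append_of_le_length (by omega), ihk (by omega)]
      have hfull : ((y :: t) ++ [x]).length = (y :: t).length + 1 := by simp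
      simp only [Prod.mk.injEq]
      refine ⟨trivial, ?_⟩
      rw [hfull]
      simp only [pvBestAux]
      rw [List.take_of_length_le (by simp), hpre _ (le_refl _)]
      by_cases hc : pvTot ((y :: t) ++ [x]) ≤ budget
      · rw [if_pos hc, if_pos hc]
        push_cast
        ring
      · rw [if_neg hc, if_neg hc]

theorem pv_main (text : String) (hashtags : List String) (limit : Int) :
    fit_hashtags_within_limit_py text hashtags limit =
      fit_hashtags_within_limit_py_alt text hashtags limit := by
  by_cases hnil : hashtags = []
  · simp [fit_hashtags_within_limit_py, fit_hashtags_within_limit_py_alt, hnil]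
  · simp only [fit_hashtags_within_limit_py, fit_hashtags_within_limit_py_alt, if_neg hnil]
    rw [pvLoopA_eq text hashtags limit hashtags.length (le_refl _)]
    rw [pvFoldB_eq (limit - PySem.Str.len text - 2) hashtags hnil]
    simp only [Nat.cast_eq_zero]
    by_cases h0 : pvBestAux hashtags (limit - PySem.Str.len text - 2) hashtags.length = 0
    · rw [if_pos h0, if_pos h0]
    · rw [if_neg h0, if_neg h0]
      rw [String.append_assoc]

-- ===== VERDICT (by name: the statement is the Claim_ definition above) =====
theorem fit_hashtags_within_limit_py_spec : Claim_equal_fit_hashtags_within_limit_py := by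
  intro text hashtags limit _
  unfold Spec_fit_hashtags_within_limit_py
  exact pv_main text hashtags limit
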